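-- pv_equiv track=rewrite | github.com/louisdmueller/form-over-function | src/analyze_outputs.py | get_experiment_and_control_votes_length
-- ===== SOURCE A (Python) =====
-- def get_experiment_and_control_votes_length(
--     votes_control: list[str], votes_experiment: list[str]
-- ) -> dict[str, int]:
--     """
--     Compute the total number of votes:
--         1. control_sae: the number of SAE votes in the control group
--         2. experiment_sae: the number of SAE votes in the experiment group when the control also voted SAE
--         3. control_aae: the number of AAE votes in the control group
--         4. experiment_aae: the number of AAE votes in the experiment group when the control also voted AAE
--     """
--     control_sae = 0
--     experiment_sae = 0
--     experiment_aae = 0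
--
--     for vote_ctrl, vote_exp in zip(votes_control, votes_experiment):
--         if vote_ctrl == "SAE Answer" or vote_ctrl == "TIE":
--             control_sae += 1
--             if vote_exp == "SAE Answer":
--                 experiment_sae += 1
--             elif vote_exp == "AAE Answer":
--                 experiment_aae += 1
--     return {
--         "control_sae": control_sae,
--         "experiment_sae": experiment_sae,
--         "experiment_aae": experiment_aae,
--     }
-- ===== SOURCE B (Python) =====
-- def get_experiment_and_control_votes_length(votes_control, votes_experiment):
--     exp_when_ctrl_sae = [
--         exp for ctrl, exp in zip(votes_control, votes_experiment)
--         if ctrl == "SAE Answer" or ctrl == "TIE"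
--     ]
--     return {
--         "control_sae": len(exp_when_ctrl_sae),
--         "experiment_sae": exp_when_ctrl_sae.count("SAE Answer"),
--         "experiment_aae": exp_when_ctrl_sae.count("AAE Answer"),
--     }
-- ===== Notes on version B (the rewrite author's own statement) =====
-- stated objective: simpler
-- what changed: Replaces the single accumulating loop with three counters by a filter of experiment votes where control voted SAE/TIE, then len plus two .count tallies over that reduced list.
import Mathlib
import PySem

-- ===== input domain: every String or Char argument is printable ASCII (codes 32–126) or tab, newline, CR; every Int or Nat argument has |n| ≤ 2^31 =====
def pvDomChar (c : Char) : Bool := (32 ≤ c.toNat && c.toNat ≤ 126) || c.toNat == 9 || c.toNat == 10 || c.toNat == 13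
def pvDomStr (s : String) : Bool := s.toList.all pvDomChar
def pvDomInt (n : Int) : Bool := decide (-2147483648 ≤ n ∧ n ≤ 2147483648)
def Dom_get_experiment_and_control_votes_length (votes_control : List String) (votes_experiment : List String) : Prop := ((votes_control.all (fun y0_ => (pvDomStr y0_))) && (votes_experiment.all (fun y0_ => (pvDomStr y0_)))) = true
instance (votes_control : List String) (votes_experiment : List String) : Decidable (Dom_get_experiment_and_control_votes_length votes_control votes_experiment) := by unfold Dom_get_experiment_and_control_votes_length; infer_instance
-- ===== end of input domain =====

-- B replaces A's single three-counter loop by a filter pass plus len/count tallies (objective: simpler).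

-- ===== PORT A =====
def get_experiment_and_control_votes_length (votes_control : List String) (votes_experiment : List String) : List (String × Int) :=
  let st := (votes_control.zip votes_experiment).foldl
    (fun (acc : Int × Int × Int) p =>
      if p.1 == "SAE Answer" || p.1 == "TIE" then
        (acc.1 + 1,
         if p.2 == "SAE Answer" then acc.2.1 + 1 else acc.2.1,
         if p.2 == "SAE Answer" then acc.2.2 else if p.2 == "AAE Answer" then acc.2.2 + 1 else acc.2.2)
      else acc)
    (0, 0, 0)
  [("control_sae", st.1), ("experiment_sae", st.2.1), ("experiment_aae", st.2.2)]

-- ===== PORT B =====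
def get_experiment_and_control_votes_length_alt (votes_control : List String) (votes_experiment : List String) : List (String × Int) :=
  let exp_when_ctrl_sae :=
    ((votes_control.zip votes_experiment).filter (fun p => p.1 == "SAE Answer" || p.1 == "TIE")).map Prod.snd
  [("control_sae", (exp_when_ctrl_sae.length : Int)),
   ("experiment_sae", PySem.List.count exp_when_ctrl_sae "SAE Answer"),
   ("experiment_aae", PySem.List.count exp_when_ctrl_sae "AAE Answer")]

-- ===== PRECONDITION & SPEC =====
def Spec_get_experiment_and_control_votes_length (votes_control : List String) (votes_experiment : List String) (out : List (String × Int)) : Prop := out = get_experiment_and_control_votes_length_alt votes_control votes_experiment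
instance (votes_control : List String) (votes_experiment : List String) (out : List (String × Int)) : Decidable (Spec_get_experiment_and_control_votes_length votes_control votes_experiment out) := by unfold Spec_get_experiment_and_control_votes_length; infer_instance

-- ===== CLAIM (what is proved, stated in full; the proofs are below) =====
def Claim_equal_get_experiment_and_control_votes_length : Prop := ∀ (votes_control : List String) (votes_experiment : List String), Dom_get_experiment_and_control_votes_length votes_control votes_experiment → Spec_get_experiment_and_control_votes_length votes_control votes_experiment (get_experiment_and_control_votes_length votes_control votes_experiment)

-- ===== LEMMAS AND PROOFS =====
theorem pv_loop_invariant (l : List (String × String)) (cs es ea : Int) :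
    l.foldl
      (fun (acc : Int × Int × Int) p =>
        if p.1 == "SAE Answer" || p.1 == "TIE" then
          (acc.1 + 1,
           if p.2 == "SAE Answer" then acc.2.1 + 1 else acc.2.1,
           if p.2 == "SAE Answer" then acc.2.2 else if p.2 == "AAE Answer" then acc.2.2 + 1 else acc.2.2)
        else acc)
      (cs, es, ea)
    = (cs + (((l.filter (fun p => p.1 == "SAE Answer" || p.1 == "TIE")).map Prod.snd).length : Int),
       es + ((((l.filter (fun p => p.1 == "SAE Answer" || p.1 == "TIE")).map Prod.snd).count "SAE Answer" : Int)),
       ea + ((((l.filter (fun p => p.1 == "SAE Answer" || p.1 == "TIE")).map Prod.snd).count "AAE Answer" : Int))) := by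
  induction l generalizing cs es ea with
  | nil => simp
  | cons hd tl ih =>
    simp only [List.foldl_cons, List.filter_cons]
    by_cases hc : (hd.1 == "SAE Answer" || hd.1 == "TIE") = true
    · simp only [hc, if_pos]
      rw [ih]
      simp only [List.map_cons, List.length_cons, List.count_cons]
      by_cases hs : hd.2 = "SAE Answer"
      · simp [hs]; constructor
        · push_cast; ring
        · push_cast; ring
      · have hs' : (hd.2 == "SAE Answer") = false := by simp [hs]
        simp only [hs']
        by_cases ha : hd.2 = "AAE Answer"
        · simp [ha]; constructor
          · push_cast; ring
          · push_cast; ring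
        · simp [ha]
          push_cast; ring
    · rw [if_neg hc, if_neg hc]
      exact ih cs es ea

-- ===== VERDICT (by name: the statement is the Claim_ definition above) =====
theorem get_experiment_and_control_votes_length_spec : Claim_equal_get_experiment_and_control_votes_length := by
  intro vc ve _
  unfold Spec_get_experiment_and_control_votes_length
  unfold get_experiment_and_control_votes_length get_experiment_and_control_votes_length_alt
  simp only [pv_loop_invariant, PySem.List.count_eq]
  simp
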